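-- pv_equiv track=rewrite | github.com/boberle/advent_of_code_2022 | 20/day20.py | swap_left
-- ===== SOURCE A (Python) =====
-- def swap_left(numbers, start, n):
--     l = len(numbers)
--     for i in range(n):
--         if start == 0:
--             numbers[start], numbers[l-1] = numbers[l-1], numbers[start]
--             start = l - 1
--         else:
--             numbers[start], numbers[start-1] = numbers[start-1], numbers[start]
--             start -= 1
--     return numbers
-- ===== SOURCE B (Python) =====
-- def swap_left(numbers, start, n):
--     # Closed-form rotation instead of n individual swaps (n reduced modulo the period l*(l-1)).
--     # A mutates `numbers` in place; B builds a new list, the return value is the same.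
--     l = len(numbers)
--     if n <= 0 or l <= 1:
--         return numbers
--     p = start % l
--     x = numbers[p]
--     others = numbers[p + 1:] + numbers[:p]
--     t = n % (l * (l - 1))
--     q = (p - t) % l
--     j = (-t) % (l - 1)
--     rotated = others[j:] + others[:j]
--     out = [x] + rotated
--     s = (l - q) % l
--     return out[s:] + out[:s]
-- ===== Notes on version B (the rewrite author's own statement) =====
-- stated objective: alternative
-- what changed: A performs n individual adjacent swaps walking the position left one step at a time; B computes the final arrangement in closed form (reduce n modulo the period l*(l-1), place the moved element at its final position via modular arithmetic and rebuild the list with slicing), trading A's O(n) swap loop for O(l) slice work.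
import Mathlib
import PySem

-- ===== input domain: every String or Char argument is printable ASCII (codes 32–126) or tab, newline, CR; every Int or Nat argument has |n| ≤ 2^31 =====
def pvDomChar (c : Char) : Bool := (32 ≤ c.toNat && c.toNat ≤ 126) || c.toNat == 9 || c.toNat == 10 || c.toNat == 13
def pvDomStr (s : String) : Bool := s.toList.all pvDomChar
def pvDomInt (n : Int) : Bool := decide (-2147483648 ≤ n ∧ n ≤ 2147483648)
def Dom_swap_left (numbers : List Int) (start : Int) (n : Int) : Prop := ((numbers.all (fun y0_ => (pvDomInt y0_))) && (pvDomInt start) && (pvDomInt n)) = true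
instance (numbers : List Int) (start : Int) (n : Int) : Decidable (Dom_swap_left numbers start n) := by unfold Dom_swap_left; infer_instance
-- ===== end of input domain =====

-- B replaces A's loop of n adjacent swaps by a closed-form rotation (n reduced modulo the period
-- l*(l-1)); note A mutates `numbers` in place while B builds a new list, so the equivalence proved
-- here is about the RETURN value only.

-- ===== PORT A =====
-- the body of `for i in range(n)`: tuple assignment ported as RHS reads first, then two sets
def swapLeftLoop (l : Int) : Nat → List Int × Int → List Int × Int
  | 0, st => st
  | t + 1, (nums, start) =>
    if start = 0 then
      let a := PySem.List.pyGetD nums (l - 1) 0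
      let b := PySem.List.pyGetD nums start 0
      swapLeftLoop l t (PySem.List.pySetD (PySem.List.pySetD nums start a) (l - 1) b, l - 1)
    else
      let a := PySem.List.pyGetD nums (start - 1) 0
      let b := PySem.List.pyGetD nums start 0
      swapLeftLoop l t (PySem.List.pySetD (PySem.List.pySetD nums start a) (start - 1) b, start - 1)

def swap_left (numbers : List Int) (start : Int) (n : Int) : List Int :=
  let l : Int := numbers.length
  (swapLeftLoop l n.toNat (numbers, start)).1

-- ===== PORT B =====
def swap_left_alt (numbers : List Int) (start : Int) (n : Int) : List Int :=
  let l : Int := numbers.length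
  if n ≤ 0 ∨ l ≤ 1 then numbers
  else
    let p := PySem.Int.mod start l
    let x := PySem.List.pyGetD numbers p 0
    let others := PySem.List.slice numbers (some (p + 1)) none ++ PySem.List.slice numbers none (some p)
    let t := PySem.Int.mod n (l * (l - 1))
    let q := PySem.Int.mod (p - t) l
    let j := PySem.Int.mod (-t) (l - 1)
    let rotated := PySem.List.slice others (some j) none ++ PySem.List.slice others none (some j)
    let out := x :: rotated
    let s := PySem.Int.mod (l - q) l
    PySem.List.slice out (some s) none ++ PySem.List.slice out none (some s)

-- ===== PRECONDITION & SPEC =====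
-- Pre_ is exactly the set of inputs on which A returns normally: A raises IndexError when the walk
-- reaches an index below -len(numbers) (n > 0 with start out of [-len, len), or a negative start
-- walked past the left end).
def Pre_swap_left (numbers : List Int) (start : Int) (n : Int) : Prop :=
  n ≤ 0 ∨ (0 ≤ start ∧ start < numbers.length) ∨
    (-(numbers.length : Int) ≤ start ∧ start < 0 ∧ n ≤ start + numbers.length)
instance (numbers : List Int) (start : Int) (n : Int) : Decidable (Pre_swap_left numbers start n) := by unfold Pre_swap_left; infer_instance

def pvWitness_swap_left : List Int × Int × Int := ([1, 2, 3, 4, 5], 2, 7)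

def Spec_swap_left (numbers : List Int) (start : Int) (n : Int) (out : List Int) : Prop := out = swap_left_alt numbers start n
instance (numbers : List Int) (start : Int) (n : Int) (out : List Int) : Decidable (Spec_swap_left numbers start n out) := by unfold Spec_swap_left; infer_instance

-- ===== CLAIM (what is proved, stated in full; the proofs are below) =====
def Claim_equal_swap_left : Prop := ∀ (numbers : List Int) (start : Int) (n : Int), Dom_swap_left numbers start n → Pre_swap_left numbers start n → Spec_swap_left numbers start n (swap_left numbers start n)

-- ===== LEMMAS AND PROOFS =====

-- left rotation by s
def rotl (ys : List Int) (s : Nat) : List Int := ys.drop s ++ ys.take s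

-- one circular step of the moving position (left by one)
def stepIdx (l : Nat) (q : Nat) : Nat := if q = 0 then l - 1 else q - 1

def iterIdx (l : Nat) : Nat → Nat → Nat
  | 0, q => q
  | t + 1, q => iterIdx l t (stepIdx l q)

lemma length_rotl (ys : List Int) (s : Nat) : (rotl ys s).length = ys.length := by
  simp [rotl]; omega

lemma rotl_zero (ys : List Int) : rotl ys 0 = ys := by simp [rotl]

lemma rotl_len (ys : List Int) : rotl ys ys.length = ys := by simp [rotl]

lemma rotl_len' (ys : List Int) (n : Nat) (h : ys.length = n) : rotl ys n = ys := by
  subst h; exact rotl_len ys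

lemma stepIdx_lt {l q : Nat} (hl : 1 ≤ l) (hq : q < l) : stepIdx l q < l := by
  unfold stepIdx; split <;> omega

lemma rotl_pred (C : List Int) (s : Nat) (h : s + 1 ≤ C.length) :
    rotl (rotl C (C.length - 1)) (s + 1) = rotl C s := by
  set L := C.length with hL
  have hlen : (C.drop (L - 1)).length = 1 := by simp; omega
  obtain ⟨c, hc⟩ := List.length_eq_one_iff.mp hlen
  have htake : C.take (L - 1) ++ [c] = C := by rw [← hc]; exact List.take_append_drop _ _
  unfold rotl
  rw [hc]
  have h1 : ([c] ++ C.take (L - 1)).drop (s + 1) = (C.take (L - 1)).drop s := by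
    simp [List.drop_append]
  have h2 : ([c] ++ C.take (L - 1)).take (s + 1) = c :: (C.take (L - 1)).take s := by
    simp [List.take_append]
  rw [h1, h2]
  have h3 : (C.take (L - 1)).drop s = (C.drop s).take (L - 1 - s) := List.drop_take
  have h4 : (C.take (L - 1)).take s = C.take s := by rw [List.take_take]; congr 1; omega
  rw [h3, h4]
  have h5 : (C.drop s).take (L - 1 - s) ++ [c] = C.drop s := by
    have : (C.drop s).drop (L - 1 - s) = [c] := by
      rw [List.drop_drop, ← hc]; congr 1; omega
    rw [← this]; exact List.take_append_drop _ _
  rw [show (C.drop s).take (L - 1 - s) ++ c :: C.take s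
        = ((C.drop s).take (L - 1 - s) ++ [c]) ++ C.take s by simp, h5]

lemma swap_base (x : Int) (o : List Int) (m j : Nat) (hm : o.length = m) (hj : j < m) :
    ((x :: rotl o j).set 0 ((x :: rotl o j).getD m 0)).set m x
      = rotl o (stepIdx m j) ++ [x] := by
  have hm1 : 1 ≤ m := by omega
  have hR : (rotl o j).length = m := by rw [length_rotl, hm]
  have hgetD : (x :: rotl o j).getD m 0 = (rotl o j).getD (m - 1) 0 := by
    rw [show m = (m - 1) + 1 by omega]
    exact List.getD_cons_succ
  have hsetm : ∀ v : Int, (v :: rotl o j).set m x = v :: (rotl o j).set (m - 1) x := by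
    intro v
    rw [show m = (m - 1) + 1 by omega]
    exact List.set_cons_succ
  rw [hgetD,
      show ((x :: rotl o j).set 0 ((rotl o j).getD (m - 1) 0))
        = (rotl o j).getD (m - 1) 0 :: rotl o j from rfl, hsetm]
  have hset : (rotl o j).set (m - 1) x = (rotl o j).take (m - 1) ++ [x] := by
    rw [List.set_eq_take_append_cons_drop, if_pos (by omega)]
    have : (rotl o j).drop (m - 1 + 1) = [] := by
      apply List.drop_eq_nil_of_le; omega
    rw [this]
  rw [hset]
  have key : (rotl o j).getD (m - 1) 0 :: (rotl o j).take (m - 1) = rotl o (stepIdx m j) := by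
    by_cases hj0 : j = 0
    · subst hj0
      rw [rotl_zero, show stepIdx m 0 = m - 1 from by unfold stepIdx; simp]
      have hdrop : o.drop (m - 1) = o[m - 1]'(by omega) :: o.drop m := by
        have := List.drop_eq_getElem_cons (l := o) (i := m - 1) (by omega)
        rwa [show m - 1 + 1 = m by omega] at this
      have hnil : o.drop m = [] := by apply List.drop_eq_nil_of_le; omega
      rw [hnil] at hdrop
      unfold rotl
      rw [hdrop, List.getD_eq_getElem o 0 (show m - 1 < o.length by omega)]
      rfl
    · have hj1 : 1 ≤ j := by omega
      have hlend : (o.drop j).length = m - j := by simp [hm]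
      have hv : (rotl o j).getD (m - 1) 0 = o[j - 1]'(by omega) := by
        rw [List.getD_eq_getElem (rotl o j) 0 (by omega)]
        show (o.drop j ++ o.take j)[m - 1]'(by simp [hm]; omega) = _
        rw [List.getElem_append_right (by rw [hlend]; omega), List.getElem_take]
        congr 1
        rw [hlend]
        omega
      have htk : (rotl o j).take (m - 1) = o.drop j ++ o.take (j - 1) := by
        show (o.drop j ++ o.take j).take (m - 1) = _
        rw [List.take_append]
        congr 1
        · exact List.take_of_length_le (by rw [hlend]; omega)
        · rw [List.take_take]
          congr 1
          rw [hlend]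
          omega
      have hdrop : o.drop (j - 1) = o[j - 1]'(by omega) :: o.drop j := by
        have := List.drop_eq_getElem_cons (l := o) (i := j - 1) (by omega)
        rwa [show j - 1 + 1 = j by omega] at this
      rw [hv, htk, show stepIdx m j = j - 1 from by unfold stepIdx; rw [if_neg hj0]]
      unfold rotl
      rw [hdrop]
      rfl
  rw [← key]
  rfl

lemma rot_swap (B : List Int) (q : Nat) (h1 : 1 ≤ q) (h2 : q < B.length) :
    (((rotl B (B.length - q)).set q ((rotl B (B.length - q)).getD (q - 1) 0)).set (q - 1)
        ((rotl B (B.length - q)).getD q 0))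
      = rotl ((B.set 0 (B.getD (B.length - 1) 0)).set (B.length - 1) (B.getD 0 0)) (B.length - q) := by
  set L := B.length with hL
  set s := L - q with hs
  have hs1 : 1 ≤ s := by omega
  have hlen1 : (B.drop s).length = q := by simp [← hL]; omega
  have ha : (rotl B s).getD (q - 1) 0 = B.getD (L - 1) 0 := by
    rw [List.getD_eq_getElem _ 0 (by rw [length_rotl]; omega),
        List.getD_eq_getElem _ 0 (by omega)]
    show (B.drop s ++ B.take s)[q - 1]'(by simp [← hL]; omega) = _
    rw [List.getElem_append_left (by omega), List.getElem_drop]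
    congr 1
    omega
  have hb : (rotl B s).getD q 0 = B.getD 0 0 := by
    rw [List.getD_eq_getElem _ 0 (by rw [length_rotl]; omega),
        List.getD_eq_getElem _ 0 (by omega)]
    show (B.drop s ++ B.take s)[q]'(by simp [← hL]; omega) = _
    rw [List.getElem_append_right (by omega), List.getElem_take]
    congr 1
    omega
  rw [ha, hb]
  have hstep1 : (rotl B s).set q (B.getD (L - 1) 0)
      = B.drop s ++ (B.take s).set 0 (B.getD (L - 1) 0) := by
    show (B.drop s ++ B.take s).set q _ = _
    rw [List.set_append, if_neg (by omega), hlen1]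
    congr 2
    omega
  rw [hstep1]
  have hstep2 : (B.drop s ++ (B.take s).set 0 (B.getD (L - 1) 0)).set (q - 1) (B.getD 0 0)
      = (B.drop s).set (q - 1) (B.getD 0 0) ++ (B.take s).set 0 (B.getD (L - 1) 0) := by
    rw [List.set_append, if_pos (by omega)]
  rw [hstep2]
  unfold rotl
  have hdropB' : ((B.set 0 (B.getD (L - 1) 0)).set (L - 1) (B.getD 0 0)).drop s
      = (B.drop s).set (q - 1) (B.getD 0 0) := by
    rw [List.drop_set, if_neg (by omega), List.drop_set, if_pos (by omega)]
    congr 1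
    omega
  have htakeB' : ((B.set 0 (B.getD (L - 1) 0)).set (L - 1) (B.getD 0 0)).take s
      = (B.take s).set 0 (B.getD (L - 1) 0) := by
    rw [List.take_set, List.set_eq_of_length_le (by simp [← hL]; omega), List.take_set]
  rw [hdropB', htakeB']

lemma iterIdx_emod (l : Nat) (hl : 1 ≤ l) (t q : Nat) (hq : q < l) :
    (iterIdx l t q : Int) = ((q : Int) - t) % l := by
  induction t generalizing q with
  | zero =>
    have : ((q : Int)) % l = q := Int.emod_eq_of_lt (by omega) (by exact_mod_cast hq)
    simp [iterIdx, this]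
  | succ t ih =>
    have hq' : stepIdx l q < l := stepIdx_lt hl hq
    have h := ih (stepIdx l q) hq'
    rw [show iterIdx l (t + 1) q = iterIdx l t (stepIdx l q) from rfl, h]
    unfold stepIdx
    split
    · subst q
      have : ((l : Int) - 1 - t) = (-1 - t) + l * 1 := by push_cast; ring
      rw [show ((l - 1 : Nat) : Int) = (l : Int) - 1 by omega, this,
          Int.add_mul_emod_self_left]
      congr 1; push_cast; ring
    · rw [show ((q - 1 : Nat) : Int) = (q : Int) - 1 by omega]
      congr 1; push_cast; ring

-- the key invariant: one loop iteration moves the assembled list one step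
lemma step_char (l : Nat) (x : Int) (o : List Int) (hl : 2 ≤ l) (ho : o.length = l - 1)
    (q j : Nat) (hq : q < l) (hj : j < l - 1) (t : Nat) :
    swapLeftLoop (l : Int) (t + 1) (rotl (x :: rotl o j) (l - q), (q : Int))
      = swapLeftLoop (l : Int) t
          (rotl (x :: rotl o (stepIdx (l - 1) j)) (l - stepIdx l q), (stepIdx l q : Int)) := by
  have hB : (x :: rotl o j).length = l := by simp [length_rotl, ho]; omega
  have hR' : (rotl o (stepIdx (l - 1) j)).length = l - 1 := by
    rw [length_rotl, ho]
  have hcast : ((l : Int)) - 1 = ((l - 1 : Nat) : Int) := by omega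
  by_cases hq0 : q = 0
  · subst hq0
    simp only [swapLeftLoop, Nat.cast_zero, if_pos rfl, Nat.sub_zero]
    rw [rotl_len' (x :: rotl o j) (l) hB, hcast]
    rw [PySem.List.pyGetD_natCast, PySem.List.pyGetD_zero, PySem.List.pySetD_natCast]
    have hset0 : ∀ (ns : List Int) (v : Int), PySem.List.pySetD ns 0 v = ns.set 0 v := by
      intro ns v
      simpa using PySem.List.pySetD_natCast ns 0 v
    rw [hset0]
    have hbase := swap_base x o (l - 1) j ho hj
    rw [List.getD_cons_zero]
    have hgoalL : ((x :: rotl o j).set 0 ((x :: rotl o j).getD (l - 1) 0)).set (l - 1) x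
        = rotl o (stepIdx (l - 1) j) ++ [x] := hbase
    rw [hgoalL]
    have hq' : stepIdx l 0 = l - 1 := by unfold stepIdx; simp
    rw [hq']
    have h1 : l - (l - 1) = 1 := by omega
    rw [h1]
    have h2 : rotl (x :: rotl o (stepIdx (l - 1) j)) 1 = rotl o (stepIdx (l - 1) j) ++ [x] := by
      simp [rotl]
    rw [h2]
    congr 1
  · have hq1 : 1 ≤ q := by omega
    simp only [swapLeftLoop]
    rw [if_neg (by exact_mod_cast hq0 : ¬ ((q : Int)) = 0)]
    have hcq : ((q : Int)) - 1 = ((q - 1 : Nat) : Int) := by omega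
    rw [hcq, PySem.List.pyGetD_natCast, PySem.List.pyGetD_natCast,
        PySem.List.pySetD_natCast, PySem.List.pySetD_natCast]
    have hrs := rot_swap (x :: rotl o j) q hq1 (by omega)
    rw [hB] at hrs
    rw [hrs]
    have hbase := swap_base x o (l - 1) j ho hj
    rw [show (x :: rotl o j).getD 0 0 = x from List.getD_cons_zero] at hrs ⊢
    rw [hbase]
    have hq' : stepIdx l q = q - 1 := by unfold stepIdx; rw [if_neg hq0]
    rw [hq']
    -- rotate-by-one bookkeeping: rotl (R' ++ [x]) (l - q) = rotl (x :: R') (l - (q - 1))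
    have hC : (rotl o (stepIdx (l - 1) j) ++ [x]).length = l := by simp [hR']; omega
    have hCrot : rotl (rotl o (stepIdx (l - 1) j) ++ [x]) (l - 1) = x :: rotl o (stepIdx (l - 1) j) := by
      show (rotl o (stepIdx (l - 1) j) ++ [x]).drop (l - 1) ++ (rotl o (stepIdx (l - 1) j) ++ [x]).take (l - 1)
          = x :: rotl o (stepIdx (l - 1) j)
      rw [List.drop_append, List.take_append, hR',
          List.drop_eq_nil_of_le (le_of_eq hR'), List.take_of_length_le (le_of_eq hR'),
          Nat.sub_self, List.drop_zero, List.take_zero, List.nil_append, List.append_nil]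
      rfl
    have hpred := rotl_pred (rotl o (stepIdx (l - 1) j) ++ [x]) (l - q) (by omega)
    rw [hC] at hpred
    rw [hCrot] at hpred
    rw [show l - (q - 1) = (l - q) + 1 by omega, ← hpred]

lemma loop_char (l : Nat) (x : Int) (o : List Int) (hl : 2 ≤ l) (ho : o.length = l - 1)
    (t : Nat) : ∀ (q j : Nat), q < l → j < l - 1 →
    swapLeftLoop (l : Int) t (rotl (x :: rotl o j) (l - q), (q : Int))
      = (rotl (x :: rotl o (iterIdx (l - 1) t j)) (l - iterIdx l t q), (iterIdx l t q : Int)) := by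
  induction t with
  | zero => intro q j _ _; simp [swapLeftLoop, iterIdx]
  | succ t ih =>
    intro q j hq hj
    rw [step_char l x o hl ho q j hq hj t,
        ih (stepIdx l q) (stepIdx (l - 1) j) (stepIdx_lt (by omega) hq) (stepIdx_lt (by omega) hj)]
    rfl

-- the initial list is itself an assembled state (t = 0)
lemma init_decomp (numbers : List Int) (p : Nat) (hp : p < numbers.length) :
    rotl (numbers.getD p 0 :: rotl (numbers.drop (p + 1) ++ numbers.take p) 0)
        (numbers.length - p) = numbers := by
  rw [rotl_zero]
  unfold rotl
  have hc1 : (numbers.getD p 0 :: numbers.drop (p + 1)).length = numbers.length - p := by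
    simp; omega
  have he : numbers.getD p 0 :: (numbers.drop (p + 1) ++ numbers.take p)
      = (numbers.getD p 0 :: numbers.drop (p + 1)) ++ numbers.take p := rfl
  rw [he]
  have hdrop : ((numbers.getD p 0 :: numbers.drop (p + 1)) ++ numbers.take p).drop
      (numbers.length - p) = numbers.take p := by
    rw [List.drop_append, hc1, Nat.sub_self, List.drop_zero,
        List.drop_eq_nil_of_le (le_of_eq hc1), List.nil_append]
  have htake : ((numbers.getD p 0 :: numbers.drop (p + 1)) ++ numbers.take p).take
      (numbers.length - p) = numbers.getD p 0 :: numbers.drop (p + 1) := by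
    rw [List.take_append, hc1, Nat.sub_self, List.take_zero, List.append_nil,
        List.take_of_length_le (le_of_eq hc1)]
  rw [hdrop, htake]
  rw [List.getD_eq_getElem _ 0 hp,
      show numbers[p] :: numbers.drop (p + 1) = numbers.drop p from
        (List.drop_eq_getElem_cons hp).symm]
  exact List.take_append_drop p numbers

-- degenerate length-1 list: the loop is the identity
lemma loop_one (t : Nat) (nums : List Int) (h : nums.length = 1) :
    swapLeftLoop (1 : Int) t (nums, 0) = (nums, 0) := by
  induction t with
  | zero => rfl
  | succ t ih =>
    have h0 : (1 : Int) - 1 = 0 := by norm_num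
    simp only [swapLeftLoop]
    rw [if_pos trivial]
    have hset0 : ∀ (ns : List Int) (v : Int), PySem.List.pySetD ns 0 v = ns.set 0 v := by
      intro ns v
      simpa using PySem.List.pySetD_natCast ns 0 v
    simp only [h0, PySem.List.pyGetD_zero]
    rw [hset0, hset0, List.set_set, List.getD_eq_getElem _ 0 (by omega), List.set_getElem_self]
    exact ih

-- a negative start in [-l, 0) behaves like start + l (Python negative indexing), as long as it never
-- walks past the left end
lemma loop_neg (l : Nat) (t : Nat) : ∀ (s : Int) (nums : List Int), nums.length = l →
    -(l : Int) ≤ s → s < 0 → (t : Int) ≤ s + l →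
    (swapLeftLoop (l : Int) t (nums, s)).1 = (swapLeftLoop (l : Int) t (nums, s + l)).1 := by
  induction t with
  | zero => intro s nums _ _ _ _; rfl
  | succ t ih =>
    intro s nums hlen h1 h2 h3
    have hl1 : 1 ≤ (l : Int) := by push_cast at h3 ⊢; omega
    have hidx : ∀ i : Int, -(l : Int) ≤ i → i < 0 →
        PySem.List.pyIdx? nums.length i = PySem.List.pyIdx? nums.length (i + l) := by
      intro i hi1 hi2
      simp only [PySem.List.pyIdx?, hlen]
      split_ifs <;> first | rfl | omega | (simp only [Option.some.injEq]; omega)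
    have hget : ∀ i : Int, -(l : Int) ≤ i → i < 0 →
        PySem.List.pyGetD nums i 0 = PySem.List.pyGetD nums (i + l) 0 := by
      intro i hi1 hi2
      simp only [PySem.List.pyGetD, PySem.List.pyGet?, hidx i hi1 hi2]
    have hset : ∀ (i : Int) (ns : List Int) (v : Int), ns.length = l → -(l : Int) ≤ i → i < 0 →
        PySem.List.pySetD ns i v = PySem.List.pySetD ns (i + l) v := by
      intro i ns v hns hi1 hi2
      have : PySem.List.pyIdx? ns.length i = PySem.List.pyIdx? ns.length (i + l) := by
        simp only [PySem.List.pyIdx?, hns]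
        split_ifs <;> first | rfl | omega | (simp only [Option.some.injEq]; omega)
      simp only [PySem.List.pySetD, PySem.List.pySet?, this]
    simp only [swapLeftLoop]
    rw [if_neg (by omega : s ≠ 0), if_neg (by omega : s + (l:Int) ≠ 0)]
    have e1 : s + (l:Int) - 1 = (s - 1) + l := by ring
    rw [hget s h1 h2, hget (s - 1) (by push_cast at h3 ⊢; omega) (by omega)]
    rw [hset s _ _ (by simp [hlen]) h1 h2]
    rw [hset (s - 1) _ _ (by simp [hlen]) (by push_cast at h3 ⊢; omega) (by omega)]
    rw [e1]
    exact ih (s - 1) _ (by simp [hlen]) (by push_cast at h3 ⊢; omega) (by omega) (by push_cast at h3 ⊢; omega)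

-- A's loop, characterised in closed form
lemma A_char (l : Nat) (numbers : List Int) (hlen : numbers.length = l) (hl : 2 ≤ l)
    (p : Nat) (hp : p < l) (t : Nat) :
    (swapLeftLoop (l : Int) t (numbers, (p : Int))).1
      = rotl (numbers.getD p 0 ::
          rotl (numbers.drop (p + 1) ++ numbers.take p) (iterIdx (l - 1) t 0))
          (l - iterIdx l t p) := by
  have ho : (numbers.drop (p + 1) ++ numbers.take p).length = l - 1 := by
    simp [hlen]; omega
  have h0 : rotl (numbers.getD p 0 :: rotl (numbers.drop (p + 1) ++ numbers.take p) 0) (l - p)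
      = numbers := by
    have := init_decomp numbers p (by omega)
    rwa [hlen] at this
  have key := loop_char l (numbers.getD p 0) (numbers.drop (p + 1) ++ numbers.take p) hl ho
    t p 0 hp (by omega)
  have h1 : (swapLeftLoop (l : Int) t (numbers, (p : Int))).1
      = (swapLeftLoop (l : Int) t
          (rotl (numbers.getD p 0 :: rotl (numbers.drop (p + 1) ++ numbers.take p) 0) (l - p),
            (p : Int))).1 := by rw [h0]
  rw [h1, key]

-- ===== VERDICT (by name: the statement is the Claim_ definition above) =====
theorem swap_left_spec : Claim_equal_swap_left := by
  intro numbers start n _ hpre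
  show swap_left numbers start n = swap_left_alt numbers start n
  by_cases hn : n ≤ 0
  · have h0 : n.toNat = 0 := by omega
    simp only [swap_left, swap_left_alt, h0]
    rw [if_pos (Or.inl hn)]
    rfl
  · push_neg at hn
    by_cases hl1 : numbers.length ≤ 1
    · have hcase : numbers.length = 1 ∧ start = 0 := by
        rcases hpre with h | ⟨h1, h2⟩ | ⟨h1, h2, h3⟩
        · omega
        · constructor <;> omega
        · exfalso; omega
      obtain ⟨hlen1, hst⟩ := hcase
      simp only [swap_left, swap_left_alt, hst, hlen1]
      rw [if_pos (Or.inr (by norm_num))]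
      exact congrArg Prod.fst (loop_one n.toNat numbers hlen1)
    · push_neg at hl1
      have hl2 : 2 ≤ numbers.length := hl1
      -- normalised start position p and the bridge from A's actual start to p
      obtain ⟨p, hp, hA, hmod⟩ :
          ∃ p : Nat, p < numbers.length ∧
            (swapLeftLoop (numbers.length : Int) n.toNat (numbers, start)).1
              = (swapLeftLoop (numbers.length : Int) n.toNat (numbers, (p : Int))).1 ∧
            start % (numbers.length : Int) = (p : Int) := by
        rcases hpre with h | ⟨h1, h2⟩ | ⟨h1, h2, h3⟩
        · omega
        · refine ⟨start.toNat, by omega, ?_, ?_⟩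
          · rw [show ((start.toNat : Nat) : Int) = start by omega]
          · rw [Int.emod_eq_of_lt h1 h2]
            omega
        · refine ⟨(start + numbers.length).toNat, by omega, ?_, ?_⟩
          · have hb := loop_neg numbers.length n.toNat start numbers rfl h1 h2 (by omega)
            have hcast : (((start + (numbers.length : Int)).toNat : Nat) : Int)
                = start + (numbers.length : Int) := by omega
            rw [hb, hcast]
          · rw [show start % (numbers.length : Int)
                = (start + numbers.length) % numbers.length from (Int.add_emod_right _ _).symm,
              Int.emod_eq_of_lt (by omega) (by omega)]
            omega
      -- A side
      have hAchar := A_char numbers.length numbers rfl hl2 p hp n.toNat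
      have hAres : swap_left numbers start n
          = rotl (numbers.getD p 0 ::
              rotl (numbers.drop (p + 1) ++ numbers.take p) (iterIdx (numbers.length - 1) n.toNat 0))
              (numbers.length - iterIdx numbers.length n.toNat p) := by
        simp only [swap_left]
        rw [hA, hAchar]
      -- B side: reduce the Python expressions
      have hLpos : (0 : Int) < (numbers.length : Int) := by omega
      have hL1pos : (0 : Int) < (numbers.length : Int) - 1 := by omega
      have hLLpos : (0 : Int) < (numbers.length : Int) * ((numbers.length : Int) - 1) := by positivity
      set L : Nat := numbers.length with hLdef
      set tI : Int := n % ((L : Int) * ((L : Int) - 1)) with htI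
      set qI : Int := ((p : Int) - tI) % (L : Int) with hqI
      set jI : Int := (-tI) % ((L : Int) - 1) with hjI
      set sI : Int := ((L : Int) - qI) % (L : Int) with hsI
      have hq0 : 0 ≤ qI := Int.emod_nonneg _ (by omega)
      have hqlt : qI < L := Int.emod_lt_of_pos _ hLpos
      have hj0 : 0 ≤ jI := Int.emod_nonneg _ (by omega)
      have hjlt : jI < (L : Int) - 1 := Int.emod_lt_of_pos _ hL1pos
      have hs0 : 0 ≤ sI := Int.emod_nonneg _ (by omega)
      have hslt : sI < L := Int.emod_lt_of_pos _ hLpos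
      have hBres : swap_left_alt numbers start n
          = rotl (numbers.getD p 0 ::
              rotl (numbers.drop (p + 1) ++ numbers.take p) jI.toNat) sI.toNat := by
        simp only [swap_left_alt]
        rw [if_neg (by push_neg; constructor <;> omega)]
        rw [PySem.Int.mod_eq_emod_of_pos hLpos, hmod]
        rw [PySem.Int.mod_eq_emod_of_pos hLLpos, PySem.Int.mod_eq_emod_of_pos hLpos,
            PySem.Int.mod_eq_emod_of_pos hL1pos, PySem.Int.mod_eq_emod_of_pos hLpos]
        rw [PySem.List.pyGetD_natCast]
        rw [show ((p : Int) + 1) = (((p + 1 : Nat)) : Int) by omega]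
        rw [PySem.List.slice_from_natCast, PySem.List.slice_to_natCast]
        rw [PySem.List.slice_from _ (by omega : (0:Int) ≤ jI),
            PySem.List.slice_to _ (by omega : (0:Int) ≤ jI)]
        rw [PySem.List.slice_from _ (by omega : (0:Int) ≤ sI),
            PySem.List.slice_to _ (by omega : (0:Int) ≤ sI)]
        rfl
      -- identify the two rotation amounts
      have hoL : (numbers.drop (p + 1) ++ numbers.take p).length = L - 1 := by
        simp [← hLdef]; omega
      have hnn : ((n.toNat : Nat) : Int) = n := by omega
      have hdvd1 : ((L : Int) - 1) ∣ ((L : Int) * ((L : Int) - 1)) := ⟨(L : Int), by ring⟩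
      have hdvd2 : ((L : Int)) ∣ ((L : Int) * ((L : Int) - 1)) := ⟨(L : Int) - 1, rfl⟩
      have hjeq : jI.toNat = iterIdx (L - 1) n.toNat 0 := by
        have h1 : ((iterIdx (L - 1) n.toNat 0 : Nat) : Int) = ((0 : Int) - n.toNat) % ((L - 1 : Nat) : Int) :=
          iterIdx_emod (L - 1) (by omega) n.toNat 0 (by omega)
        have h2 : (-tI) % ((L : Int) - 1) = (0 - n) % ((L : Int) - 1) := by
          rw [show -tI = 0 - tI by ring, Int.sub_emod, htI,
              Int.emod_emod_of_dvd n hdvd1, ← Int.sub_emod]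
        rw [hnn] at h1
        have h3 : ((L - 1 : Nat) : Int) = (L : Int) - 1 := by omega
        rw [h3] at h1
        omega
      have hqeq : qI.toNat = iterIdx L n.toNat p := by
        have h1 : ((iterIdx L n.toNat p : Nat) : Int) = ((p : Int) - n.toNat) % ((L : Nat) : Int) :=
          iterIdx_emod L (by omega) n.toNat p hp
        have h2 : qI = ((p : Int) - n) % (L : Int) := by
          rw [hqI, Int.sub_emod, htI, Int.emod_emod_of_dvd n hdvd2, ← Int.sub_emod]
        rw [hnn] at h1
        omega
      rw [hAres, hBres, hjeq]
      -- the outer rotation: rotate by L when q = 0, by L - q otherwise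
      have hlenout : (numbers.getD p 0 ::
          rotl (numbers.drop (p + 1) ++ numbers.take p) (iterIdx (L - 1) n.toNat 0)).length = L := by
        simp [length_rotl, hoL]
        omega
      by_cases hqz : qI = 0
      · have h1 : sI.toNat = 0 := by
          have : sI = ((L : Int)) % (L : Int) := by rw [hsI, hqz, sub_zero]
          rw [Int.emod_self] at this
          omega
        have h2 : L - iterIdx L n.toNat p = L := by omega
        rw [h1, h2, rotl_zero, rotl_len' _ _ hlenout]
      · have h1 : sI = (L : Int) - qI := by
          rw [hsI, Int.emod_eq_of_lt (by omega) (by omega)]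
        have h2 : L - iterIdx L n.toNat p = sI.toNat := by omega
        rw [h2]
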